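-- pv_equiv track=rewrite | github.com/XuanxuanRao/BUAA_OO_TEST_2024 | Unit1/homework1/DataGenerator_hw1.py | check
-- ===== SOURCE A (Python) =====
-- def check(expression: str, parentheses_limit: int) -> bool:
--     top = 0
--     for char in expression:
--         if char == '(':
--             top += 1
--             if top > parentheses_limit:
--                 return False
--         elif char == ')':
--             top -= 1
--     return top == 0
-- ===== SOURCE B (Python) =====
-- def check(expression: str, parentheses_limit: int) -> bool:
--     chars = list(expression)
--     opens_ok = all(
--         chars[:i + 1].count('(') - chars[:i + 1].count(')') <= parentheses_limit
--         for i, c in enumerate(chars) if c == '('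
--     )
--     return opens_ok and chars.count('(') == chars.count(')')
-- ===== Notes on version B (the rewrite author's own statement) =====
-- stated objective: alternative
-- what changed: Replaces A's early-exit running-counter loop with aggregate checks: every prefix ending at a '(' is tested against the limit via prefix paren-counts, and overall balance is tested by comparing total '(' and ')' counts.
import Mathlib
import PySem

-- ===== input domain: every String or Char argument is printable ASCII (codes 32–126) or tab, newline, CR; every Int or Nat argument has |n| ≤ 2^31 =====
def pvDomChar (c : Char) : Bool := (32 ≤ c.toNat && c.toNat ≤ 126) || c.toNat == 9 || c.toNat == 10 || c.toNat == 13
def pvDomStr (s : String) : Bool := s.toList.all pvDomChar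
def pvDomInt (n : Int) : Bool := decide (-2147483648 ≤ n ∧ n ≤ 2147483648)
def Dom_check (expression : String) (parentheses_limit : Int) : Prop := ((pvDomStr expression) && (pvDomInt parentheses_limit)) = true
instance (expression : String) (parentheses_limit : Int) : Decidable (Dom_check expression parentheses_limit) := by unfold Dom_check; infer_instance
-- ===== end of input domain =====

-- ===== PORT A =====
-- B is an alternative decomposition (aggregate prefix-count checks instead of an early-exit running counter); return-value equivalence only.

-- the for-loop of A with early 'return False', as structural recursion over the characters
def checkLoop (cs : List Char) (top lim : Int) : Bool :=
  match cs with
  | [] => top == 0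
  | c :: rest =>
    if c = '(' then
      if top + 1 > lim then false else checkLoop rest (top + 1) lim
    else if c = ')' then checkLoop rest (top - 1) lim
    else checkLoop rest top lim

def check (expression : String) (parentheses_limit : Int) : Bool :=
  checkLoop expression.toList 0 parentheses_limit

-- ===== PORT B =====
def check_alt (expression : String) (parentheses_limit : Int) : Bool :=
  let chars := expression.toList
  let opensOk := (PySem.List.enumerate chars).all (fun ic =>
    if ic.2 = '(' then
      decide ((((PySem.List.slice chars none (some (ic.1 + 1))).count '(' : Int)
        - ((PySem.List.slice chars none (some (ic.1 + 1))).count ')' : Int)) ≤ parentheses_limit)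
    else true)
  opensOk && (chars.count '(' == chars.count ')')

-- ===== PRECONDITION & SPEC =====
def Spec_check (expression : String) (parentheses_limit : Int) (out : Bool) : Prop := out = check_alt expression parentheses_limit
instance (expression : String) (parentheses_limit : Int) (out : Bool) : Decidable (Spec_check expression parentheses_limit out) := by unfold Spec_check; infer_instance

-- ===== CLAIM (what is proved, stated in full; the proofs are below) =====
def Claim_equal_check : Prop := ∀ (expression : String) (parentheses_limit : Int), Dom_check expression parentheses_limit → Spec_check expression parentheses_limit (check expression parentheses_limit)

-- ===== LEMMAS AND PROOFS =====


-- balance of a prefix: '(' count minus ')' count, as an Int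
def bal (l : List Char) : Int := (l.count '(' : Int) - (l.count ')' : Int)

theorem bal_nil : bal [] = 0 := rfl

theorem bal_cons (c : Char) (l : List Char) :
    bal (c :: l) = (if c = '(' then 1 else if c = ')' then -1 else 0) + bal l := by
  simp only [bal, List.count_cons]
  split_ifs <;> simp_all <;> ring

theorem all_congr_mem {α : Type} {l : List α} {f g : α → Bool}
    (h : ∀ x ∈ l, f x = g x) : l.all f = l.all g := by
  induction l with
  | nil => rfl
  | cons x xs ih =>
    simp only [List.all_cons, h x (List.mem_cons_self), ih (fun y hy => h y (List.mem_cons_of_mem _ hy))]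

-- the loop invariant: A's early-exit loop equals "all '('-prefixes within limit AND final balance zero"
theorem bal_cons' (c : Char) (l : List Char) : bal (c :: l) = bal [c] + bal l := by
  rw [bal_cons, bal_cons, bal_nil, add_zero]

theorem loop_eq (cs : List Char) : ∀ (top lim s : Int),
    checkLoop cs top lim =
      (((PySem.List.enumerate cs s).all fun ic =>
          if ic.2 = '(' then decide (top + bal (cs.take ((ic.1 - s).toNat + 1)) ≤ lim) else true)
        && decide (top + bal cs = 0)) := by
  induction cs with
  | nil =>
    intro top lim s
    rw [Bool.eq_iff_iff]
    simp [checkLoop, PySem.List.enumerate_nil, bal_nil]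
  | cons c rest ih =>
    intro top lim s
    rw [PySem.List.enumerate_cons, List.all_cons]
    have hfirst : (if (Prod.snd (s, c)) = '(' then
          decide (top + bal ((c :: rest).take (((Prod.fst (s, c)) - s).toNat + 1)) ≤ lim) else true)
        = (if c = '(' then decide (top + 1 ≤ lim) else true) := by
      have h0 : ((s : Int) - s).toNat = 0 := by omega
      simp only [h0, List.take_succ_cons, List.take_zero, bal_cons, bal_nil]
      by_cases hc : c = '(' <;> simp [hc]
    rw [hfirst]
    have hshift :
        ((PySem.List.enumerate rest (s + 1)).all fun ic =>
            if ic.2 = '(' then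
              decide (top + bal ((c :: rest).take ((ic.1 - s).toNat + 1)) ≤ lim) else true)
          = ((PySem.List.enumerate rest (s + 1)).all fun ic =>
            if ic.2 = '(' then
              decide ((top + bal [c]) + bal (rest.take ((ic.1 - (s + 1)).toNat + 1)) ≤ lim)
            else true) := by
      apply all_congr_mem
      intro ic hic
      rcases (PySem.List.mem_enumerate_iff _ _ _).mp hic with ⟨k, hk, rfl⟩
      have h1 : ((s + 1 + (k : Int)) - s).toNat = k + 1 := by omega
      have h2 : ((s + 1 + (k : Int)) - (s + 1)).toNat = k := by omega
      simp only [h1, h2, List.take_succ_cons]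
      rw [bal_cons' c]
      simp only [add_assoc]
    rw [hshift, bal_cons' c rest]
    by_cases hc : c = '('
    · subst hc
      rw [show bal ['('] = 1 from by decide, if_pos rfl]
      by_cases hlim : top + 1 > lim
      · rw [show checkLoop ('(' :: rest) top lim = false from by simp [checkLoop, hlim],
          Bool.eq_iff_iff]
        simp only [Bool.false_eq_true, false_iff, Bool.and_eq_true, decide_eq_true_eq]
        rintro ⟨⟨h, _⟩, _⟩; omega
      · rw [show checkLoop ('(' :: rest) top lim = checkLoop rest (top + 1) lim from by
            simp [checkLoop, hlim],
          ih (top + 1) lim (s + 1), Bool.eq_iff_iff]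
        simp only [Bool.and_eq_true, decide_eq_true_eq]
        constructor
        · rintro ⟨hb, h⟩; exact ⟨⟨by omega, hb⟩, by omega⟩
        · rintro ⟨⟨_, hb⟩, h⟩; exact ⟨hb, by omega⟩
    · rw [if_neg hc, Bool.true_and]
      by_cases hc2 : c = ')'
      · subst hc2
        rw [show bal [')'] = -1 from by decide,
          show checkLoop (')' :: rest) top lim = checkLoop rest (top - 1) lim from by
            simp [checkLoop],
          ih (top - 1) lim (s + 1),
          show top + -1 = top - 1 from by ring, Bool.eq_iff_iff]
        simp only [Bool.and_eq_true, decide_eq_true_eq]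
        constructor
        · rintro ⟨hb, h⟩; exact ⟨hb, by omega⟩
        · rintro ⟨hb, h⟩; exact ⟨hb, by omega⟩
      · rw [show bal [c] = 0 from by
            rw [show bal [c] = bal (c :: []) from rfl, bal_cons, bal_nil]; simp [hc, hc2],
          show checkLoop (c :: rest) top lim = checkLoop rest top lim from by
            simp [checkLoop, hc, hc2],
          ih top lim (s + 1),
          show top + (0:Int) = top from by ring, Bool.eq_iff_iff]
        simp only [Bool.and_eq_true, decide_eq_true_eq]
        constructor
        · rintro ⟨hb, h⟩; exact ⟨hb, by omega⟩
        · rintro ⟨hb, h⟩; exact ⟨hb, by omega⟩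

theorem check_alt_eq (expression : String) (lim : Int) :
    check_alt expression lim =
      (((PySem.List.enumerate expression.toList (0:Int)).all fun ic =>
          if ic.2 = '(' then
            decide ((0:Int) + bal (expression.toList.take ((ic.1 - 0).toNat + 1)) ≤ lim) else true)
        && decide ((0:Int) + bal expression.toList = 0)) := by
  unfold check_alt
  simp only []
  congr 1
  · apply all_congr_mem
    intro ic hic
    rcases (PySem.List.mem_enumerate_iff _ _ _).mp hic with ⟨k, hk, rfl⟩
    split
    · have h0 : (0 : Int) + (k : Int) + 1 = ((k + 1 : Nat) : Int) := by push_cast; ring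
      rw [h0, PySem.List.slice_to_natCast]
      have h1 : ((0 + (k:Int)) - 0).toNat = k := by omega
      rw [h1]
      rw [Bool.eq_iff_iff]
      simp only [decide_eq_true_eq, bal]
      omega
    · rfl
  · rw [Bool.eq_iff_iff]
    simp only [beq_iff_eq, decide_eq_true_eq, bal]
    omega

-- ===== VERDICT (by name: the statement is the Claim_ definition above) =====
theorem check_spec : Claim_equal_check := by
  intro expression parentheses_limit _
  unfold Spec_check check
  rw [check_alt_eq, loop_eq expression.toList 0 parentheses_limit 0]
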